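-- pv_equiv track=rewrite | github.com/med-air/AI-Endo | utils/report_tools.py | find_clips
-- ===== SOURCE A (Python) =====
-- def find_clips(frame_idxs):
--     clip_durations = []  # [[start1, end1], ...]
--     if len(frame_idxs) != 0:
--         gaps = [right - left for left, right in zip(frame_idxs[:-1], frame_idxs[1:])]
--
--         duration = [frame_idxs[0]]
--         for idx, gap in enumerate(gaps):
--             if gap > 1:
--                 duration.append(frame_idxs[idx])
--                 clip_durations.append(duration[1] - duration[0])
--                 duration = [frame_idxs[idx + 1]]
--         duration.append(frame_idxs[-1])
--         clip_durations.append(duration[1] - duration[0])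
--
--     return clip_durations
-- ===== SOURCE B (Python) =====
-- def find_clips(frame_idxs):
--     if not frame_idxs:
--         return []
--     n = len(frame_idxs)
--     # phase 1: table of breakpoint positions (i where the gap before position i exceeds 1)
--     breaks = [i for i in range(1, n) if frame_idxs[i] - frame_idxs[i - 1] > 1]
--     # phase 2: derive segment boundaries and emit each segment's duration
--     starts = [0] + breaks
--     ends = [b - 1 for b in breaks] + [n - 1]
--     return [frame_idxs[e] - frame_idxs[s] for s, e in zip(starts, ends)]
-- ===== Notes on version B (the rewrite author's own statement) =====
-- stated objective: alternative
-- what changed: A's single fused scan with a mutable two-element buffer is replaced by a two-phase decomposition: first build the table of breakpoint positions (where the gap exceeds 1), then derive segment start/end index pairs and map them to durations.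
import Mathlib
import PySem

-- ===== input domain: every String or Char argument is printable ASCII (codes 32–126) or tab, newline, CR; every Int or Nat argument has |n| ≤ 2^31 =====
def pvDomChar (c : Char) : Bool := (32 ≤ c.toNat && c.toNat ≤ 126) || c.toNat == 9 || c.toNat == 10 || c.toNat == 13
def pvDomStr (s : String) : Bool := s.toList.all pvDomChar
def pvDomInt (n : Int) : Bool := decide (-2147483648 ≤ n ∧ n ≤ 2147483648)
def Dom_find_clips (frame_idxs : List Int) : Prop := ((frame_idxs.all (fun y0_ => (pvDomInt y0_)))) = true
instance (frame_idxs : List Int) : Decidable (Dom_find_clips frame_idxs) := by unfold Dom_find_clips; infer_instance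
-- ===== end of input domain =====

-- B replaces A's fused scan-with-mutable-buffer by a two-phase decomposition: first a table of
-- breakpoint positions, then segment (start,end) pairs mapped to durations (objective: alternative).

-- ===== PORT A =====
def find_clips (frame_idxs : List Int) : List Int :=
  if frame_idxs.length ≠ 0 then
    let gaps := (List.zip (PySem.List.slice frame_idxs none (some (-1)))
                          (PySem.List.slice frame_idxs (some 1) none)).map (fun lr => lr.2 - lr.1)
    let st := (PySem.List.enumerate gaps).foldl
      (fun (s : List Int × List Int) (ig : Int × Int) =>
        if ig.2 > 1 then
          let duration := s.1 ++ [PySem.List.pyGetD frame_idxs ig.1 0]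
          let clips := s.2 ++ [PySem.List.pyGetD duration 1 0 - PySem.List.pyGetD duration 0 0]
          ([PySem.List.pyGetD frame_idxs (ig.1 + 1) 0], clips)
        else s)
      ([PySem.List.pyGetD frame_idxs 0 0], ([] : List Int))
    let duration := st.1 ++ [PySem.List.pyGetD frame_idxs (-1) 0]
    st.2 ++ [PySem.List.pyGetD duration 1 0 - PySem.List.pyGetD duration 0 0]
  else []

-- ===== PORT B =====
def find_clips_alt (frame_idxs : List Int) : List Int :=
  if frame_idxs = [] then []
  else
    let n : Int := frame_idxs.length
    let breaks := (PySem.List.pyRange 1 n).filter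
      (fun i => PySem.List.pyGetD frame_idxs i 0 - PySem.List.pyGetD frame_idxs (i - 1) 0 > 1)
    let starts := 0 :: breaks
    let ends := breaks.map (fun b => b - 1) ++ [n - 1]
    (starts.zip ends).map (fun se => PySem.List.pyGetD frame_idxs se.2 0 - PySem.List.pyGetD frame_idxs se.1 0)

-- ===== PRECONDITION & SPEC =====
def Spec_find_clips (frame_idxs : List Int) (out : List Int) : Prop := out = find_clips_alt frame_idxs
instance (frame_idxs : List Int) (out : List Int) : Decidable (Spec_find_clips frame_idxs out) := by unfold Spec_find_clips; infer_instance

-- ===== CLAIM (what is proved, stated in full; the proofs are below) =====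
def Claim_equal_find_clips : Prop := ∀ (frame_idxs : List Int), Dom_find_clips frame_idxs → Spec_find_clips frame_idxs (find_clips frame_idxs)

-- ===== LEMMAS AND PROOFS =====

-- reference recursion: durations of the maximal runs split where a gap exceeds 1
def specGo : Int → List Int → List Int
  | _, [] => []
  | start, [p] => [p - start]
  | start, p :: q :: t => if q - p > 1 then (p - start) :: specGo q (q :: t) else specGo start (q :: t)

def gapsOf (suf : List Int) : List Int :=
  (List.zip suf.dropLast suf.tail).map (fun lr => lr.2 - lr.1)

def stepA (F : List Int) (s : List Int × List Int) (ig : Int × Int) : List Int × List Int :=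
  if ig.2 > 1 then
    let duration := s.1 ++ [PySem.List.pyGetD F ig.1 0]
    let clips := s.2 ++ [PySem.List.pyGetD duration 1 0 - PySem.List.pyGetD duration 0 0]
    ([PySem.List.pyGetD F (ig.1 + 1) 0], clips)
  else s

def brkAux : Int → List Int → List Int
  | i, p :: q :: t => if q - p > 1 then (i + 1) :: brkAux (i + 1) (q :: t) else brkAux (i + 1) (q :: t)
  | _, _ => []

def pairsOf : Int → List Int → Int → List (Int × Int)
  | s, [], e => [(s, e)]
  | s, b :: r, e => (s, b - 1) :: pairsOf b r e

lemma getD_drop_cons (F : List Int) (i : Nat) (p : Int) (r : List Int)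
    (h : F.drop i = p :: r) : F.getD i 0 = p := by
  have h0 : (F.drop i)[0]? = some p := by simp [h]
  rw [List.getElem?_drop] at h0
  simp at h0
  simp [List.getD, h0]

lemma getLast_drop (F : List Int) (i : Nat) (suf : List Int) (h : F.drop i = suf)
    (hne : suf ≠ []) (hF : F ≠ []) : F.getLast hF = suf.getLast hne := by
  have h1 : F.getLast? = suf.getLast? := by
    conv_lhs => rw [← List.take_append_drop i F, h]
    exact List.getLast?_append_of_ne_nil _ hne
  rw [List.getLast?_eq_some_getLast hF, List.getLast?_eq_some_getLast hne] at h1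
  exact Option.some.inj h1

lemma drop_succ_of_drop_cons (F : List Int) (i : Nat) (p : Int) (r : List Int)
    (h : F.drop i = p :: r) : F.drop (i + 1) = r := by
  have : F.drop (i + 1) = (F.drop i).drop 1 := by rw [List.drop_drop]
  simp [this, h]

lemma gapsOf_cons_cons (p q : Int) (t : List Int) :
    gapsOf (p :: q :: t) = (q - p) :: gapsOf (q :: t) := by
  simp [gapsOf]

lemma foldA (F : List Int) (hF : F ≠ []) :
    ∀ (suf : List Int) (i : Nat) (start : Int) (acc : List Int),
    F.drop i = suf → suf ≠ [] →
    ∃ x cl, (PySem.List.enumerate (gapsOf suf) (i : Int)).foldl (stepA F) ([start], acc) = ([x], cl)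
      ∧ cl ++ [F.getLast hF - x] = acc ++ specGo start suf := by
  intro suf
  induction suf with
  | nil => intro _ _ _ _ h; exact absurd rfl h
  | cons p rest ih =>
    intro i start acc hdrop _
    cases rest with
    | nil =>
      refine ⟨start, acc, ?_, ?_⟩
      · simp [gapsOf, PySem.List.enumerate_nil]
      · have hlast : F.getLast hF = p := getLast_drop F i [p] hdrop (by simp) hF
        simp [hlast, specGo]
    | cons q t =>
      have hdrop' : F.drop (i + 1) = q :: t := drop_succ_of_drop_cons F i p (q :: t) hdrop
      have hFi : F.getD i 0 = p := getD_drop_cons F i p _ hdrop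
      have hFi1 : F.getD (i + 1) 0 = q := getD_drop_cons F (i + 1) q t hdrop'
      rw [gapsOf_cons_cons, PySem.List.enumerate_cons]
      simp only [List.foldl_cons]
      have hcast : (i : Int) + 1 = ((i + 1 : Nat) : Int) := by push_cast; ring
      by_cases hgap : q - p > 1
      · have hstep : stepA F ([start], acc) ((i : Int), q - p)
            = ([q], acc ++ [p - start]) := by
          have e1 : PySem.List.pyGetD F (i : Int) 0 = p := by
            rw [PySem.List.pyGetD_natCast, hFi]
          have e2 : PySem.List.pyGetD F ((i : Int) + 1) 0 = q := by
            rw [hcast, PySem.List.pyGetD_natCast, hFi1]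
          simp only [stepA]
          rw [if_pos hgap]
          simp [e1, e2, PySem.List.pyGetD_ofNat']
        rw [hstep, hcast]
        obtain ⟨x, cl, heq, hres⟩ := ih (i + 1) q (acc ++ [p - start]) hdrop' (by simp)
        refine ⟨x, cl, heq, ?_⟩
        rw [hres]
        simp [specGo, hgap]
      · have hstep : stepA F ([start], acc) ((i : Int), q - p) = ([start], acc) := by
          simp [stepA, hgap]
        rw [hstep, hcast]
        obtain ⟨x, cl, heq, hres⟩ := ih (i + 1) start acc hdrop' (by simp)
        refine ⟨x, cl, heq, ?_⟩
        rw [hres]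
        simp [specGo, hgap]

lemma A_eq (F : List Int) (hF : F ≠ []) : find_clips F = specGo (F.getD 0 0) F := by
  have hlen : F.length ≠ 0 := by simpa using hF
  unfold find_clips
  rw [if_pos hlen]
  rw [PySem.List.slice_to_neg_one, PySem.List.slice_from_one]
  have hfold := foldA F hF F 0 (F.getD 0 0) [] (by simp) hF
  simp only [Nat.cast_zero] at hfold
  obtain ⟨x, cl, heq, hres⟩ := hfold
  show (let st := (PySem.List.enumerate (gapsOf F)).foldl (stepA F) ([PySem.List.pyGetD F 0 0], []);
        let duration := st.1 ++ [PySem.List.pyGetD F (-1) 0]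
        st.2 ++ [PySem.List.pyGetD duration 1 0 - PySem.List.pyGetD duration 0 0]) = _
  rw [PySem.List.pyGetD_zero]
  rw [heq]
  rw [PySem.List.pyGetD_neg_one F 0 hF]
  simpa [PySem.List.pyGetD_ofNat'] using hres

lemma zip_starts_ends (e : Int) :
    ∀ (bs : List Int) (s : Int),
    List.zip (s :: bs) (bs.map (fun b => b - 1) ++ [e]) = pairsOf s bs e := by
  intro bs
  induction bs with
  | nil => intro s; simp [pairsOf]
  | cons b r ih => intro s; simp only [List.map_cons, List.cons_append, List.zip_cons_cons, pairsOf]; rw [ih]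

lemma brk_eq (F : List Int) :
    ∀ (suf : List Int) (i : Nat), F.drop i = suf → i + suf.length = F.length →
    (PySem.List.pyRange ((i : Int) + 1) (F.length : Int)).filter
        (fun j => PySem.List.pyGetD F j 0 - PySem.List.pyGetD F (j - 1) 0 > 1)
      = brkAux (i : Int) suf := by
  intro suf
  induction suf with
  | nil =>
    intro i _ hlen
    have h1 : i = F.length := by simpa using hlen
    rw [PySem.List.pyRange_one_eq_nil (by omega)]
    simp [brkAux]
  | cons p rest ih =>
    intro i hdrop hlen
    cases rest with
    | nil =>
      have h1 : i + 1 = F.length := by simpa using hlen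
      rw [PySem.List.pyRange_one_eq_nil (by omega)]
      simp [brkAux]
    | cons q t =>
      have hdrop' : F.drop (i + 1) = q :: t := drop_succ_of_drop_cons F i p (q :: t) hdrop
      have hFi : F.getD i 0 = p := getD_drop_cons F i p _ hdrop
      have hFi1 : F.getD (i + 1) 0 = q := getD_drop_cons F (i + 1) q t hdrop'
      have hlt : (i : Int) + 1 < (F.length : Int) := by
        simp only [List.length_cons] at hlen; omega
      rw [PySem.List.pyRange_one_cons hlt]
      have hcast : (i : Int) + 1 = ((i + 1 : Nat) : Int) := by push_cast; ring
      have hpred : (PySem.List.pyGetD F ((i : Int) + 1) 0 - PySem.List.pyGetD F (((i : Int) + 1) - 1) 0 > 1) = (q - p > 1) := by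
        have h1 : ((i : Int) + 1) - 1 = (i : Int) := by ring
        rw [h1, hcast, PySem.List.pyGetD_natCast, PySem.List.pyGetD_natCast, hFi, hFi1]
      have ihx := ih (i + 1) hdrop' (by simp at hlen ⊢; omega)
      rw [List.filter_cons]
      by_cases hgap : q - p > 1
      · simp only [hpred, hgap, decide_true, if_pos]
        rw [show (i : Int) + 1 + 1 = ((i + 1 : Nat) : Int) + 1 by push_cast; ring, ihx]
        have hrhs : brkAux (i : Int) (p :: q :: t) = ((i : Int) + 1) :: brkAux ((i : Int) + 1) (q :: t) := by
          simp only [brkAux]; rw [if_pos hgap]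
        rw [hrhs, hcast]
      · simp only [hpred, hgap, decide_false, if_neg, Bool.false_eq_true, not_false_iff]
        rw [show (i : Int) + 1 + 1 = ((i + 1 : Nat) : Int) + 1 by push_cast; ring, ihx]
        have hrhs : brkAux (i : Int) (p :: q :: t) = brkAux ((i : Int) + 1) (q :: t) := by
          simp only [brkAux]; rw [if_neg hgap]
        rw [hrhs, hcast]

lemma emit_eq (F : List Int) :
    ∀ (suf : List Int) (i s : Nat), F.drop i = suf → i + suf.length = F.length → suf ≠ [] → s < F.length →
    (pairsOf (s : Int) (brkAux (i : Int) suf) ((F.length : Int) - 1)).map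
        (fun se => PySem.List.pyGetD F se.2 0 - PySem.List.pyGetD F se.1 0)
      = specGo (F.getD s 0) suf := by
  intro suf
  induction suf with
  | nil => intro _ _ _ _ h; exact absurd rfl h
  | cons p rest ih =>
    intro i s hdrop hlen _ hs
    have hFi : F.getD i 0 = p := getD_drop_cons F i p _ hdrop
    cases rest with
    | nil =>
      have hilen : i + 1 = F.length := by simpa using hlen
      have hi : ((F.length : Int) - 1) = (i : Int) := by omega
      simp only [brkAux, pairsOf, List.map_cons, List.map_nil]
      rw [hi, PySem.List.pyGetD_natCast, PySem.List.pyGetD_natCast, hFi]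
      simp [specGo]
    | cons q t =>
      have hdrop' : F.drop (i + 1) = q :: t := drop_succ_of_drop_cons F i p (q :: t) hdrop
      have hFi1 : F.getD (i + 1) 0 = q := getD_drop_cons F (i + 1) q t hdrop'
      have hlen' : (i + 1) + (q :: t).length = F.length := by simp at hlen ⊢; omega
      have hcast : (i : Int) + 1 = ((i + 1 : Nat) : Int) := by push_cast; ring
      have hs1 : i + 1 < F.length := by simp at hlen; omega
      by_cases hgap : q - p > 1
      · have hb : brkAux (i : Int) (p :: q :: t) = ((i : Int) + 1) :: brkAux ((i : Int) + 1) (q :: t) := by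
          simp only [brkAux]; rw [if_pos hgap]
        rw [hb]
        simp only [pairsOf, List.map_cons]
        have h1 : (i : Int) + 1 - 1 = ((i : Nat) : Int) := by ring
        rw [h1, PySem.List.pyGetD_natCast, PySem.List.pyGetD_natCast, hFi]
        rw [hcast, ih (i + 1) (i + 1) hdrop' hlen' (by simp) hs1, hFi1]
        simp [specGo, hgap]
      · have hb : brkAux (i : Int) (p :: q :: t) = brkAux ((i : Int) + 1) (q :: t) := by
          simp only [brkAux]; rw [if_neg hgap]
        rw [hb]
        rw [hcast, ih (i + 1) s hdrop' hlen' (by simp) hs]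
        simp [specGo, hgap]

lemma B_eq (F : List Int) (hF : F ≠ []) : find_clips_alt F = specGo (F.getD 0 0) F := by
  unfold find_clips_alt
  rw [if_neg hF]
  have hbrk := brk_eq F F 0 (by simp) (by simp)
  simp only [Nat.cast_zero, zero_add] at hbrk
  show (List.zip (0 :: (PySem.List.pyRange 1 (F.length : Int)).filter _)
        ((((PySem.List.pyRange 1 (F.length : Int)).filter _).map (fun b => b - 1)) ++ [(F.length : Int) - 1])).map _ = _
  rw [hbrk, zip_starts_ends ((F.length : Int) - 1) (brkAux 0 F) 0]
  have hemit := emit_eq F F 0 0 (by simp) (by simp) hF (List.length_pos_of_ne_nil hF)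
  simpa using hemit

-- ===== VERDICT (by name: the statement is the Claim_ definition above) =====
theorem find_clips_spec : Claim_equal_find_clips := by
  intro F _
  unfold Spec_find_clips
  by_cases hF : F = []
  · subst hF; rfl
  · rw [A_eq F hF, B_eq F hF]
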